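-- pv_equiv track=rewrite | github.com/LoneFarrell/LoneFarrell | scripts/account_summarizer.py | assign_orbits
-- ===== SOURCE A (Python) =====
-- from collections import Counter, defaultdict
-- from typing import Dict, Iterable, List, Mapping, MutableMapping, Sequence
--
-- def assign_orbits(
--     sentences: Sequence[str],
--     keyword_map: Mapping[str, Sequence[str]],
--     shared_label: str,
-- ) -> MutableMapping[str, List[str]]:
--     compiled = {
--         orbit: [kw.lower() for kw in keywords]
--         for orbit, keywords in keyword_map.items()
--     }
--     buckets: MutableMapping[str, List[str]] = defaultdict(list)
--     for sentence in sentences: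
--         lower = sentence.lower()
--         matched = [orbit for orbit, keywords in compiled.items() if any(kw in lower for kw in keywords)]
--         target_orbits = matched or [shared_label]
--         for orbit in target_orbits:
--             buckets[orbit].append(sentence)
--     return buckets
-- ===== SOURCE B (Python) =====
-- def assign_orbits(sentences, keyword_map, shared_label):
--     # keyword-major matching + group-by: flatten (lowered keyword, orbit) pairs once,
--     # scan them per sentence with a seen-set skip for already-matched orbits, then build
--     # the result dict from the deduplicated key order with one filter per orbit.
--     pairs = [(kw.lower(), orbit) for orbit, kws in keyword_map.items() for kw in kws]
--     targets = []
--     for sentence in sentences: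
--         low = sentence.lower()
--         ms = []
--         seen = set()
--         for kw, orbit in pairs:
--             if orbit in seen:
--                 continue
--             if kw in low:
--                 ms.append(orbit)
--                 seen.add(orbit)
--         tgt = ms if ms else [shared_label]
--         targets.append((sentence, tgt, set(tgt)))
--     order = list(dict.fromkeys(o for _, tgt, _ in targets for o in tgt))
--     return {o: [s for s, _, mset in targets if o in mset] for o in order}
-- ===== Notes on version B (the rewrite author's own statement) =====
-- stated objective: alternative
-- what changed: A appends each sentence into a defaultdict bucket per matched orbit inside a sentence/orbit/any() triple loop; B flattens the keyword map into (lowered keyword, orbit) pairs scanned keyword-major with an early skip for already-matched orbits, records each sentence's target list once, and builds the result dict by deduplicating the key order and filtering the recorded targets per orbit. Pre_ excludes association lists with duplicate orbit keys, which cannot arise from A's dict-typed keyword_map.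
import Mathlib
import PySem

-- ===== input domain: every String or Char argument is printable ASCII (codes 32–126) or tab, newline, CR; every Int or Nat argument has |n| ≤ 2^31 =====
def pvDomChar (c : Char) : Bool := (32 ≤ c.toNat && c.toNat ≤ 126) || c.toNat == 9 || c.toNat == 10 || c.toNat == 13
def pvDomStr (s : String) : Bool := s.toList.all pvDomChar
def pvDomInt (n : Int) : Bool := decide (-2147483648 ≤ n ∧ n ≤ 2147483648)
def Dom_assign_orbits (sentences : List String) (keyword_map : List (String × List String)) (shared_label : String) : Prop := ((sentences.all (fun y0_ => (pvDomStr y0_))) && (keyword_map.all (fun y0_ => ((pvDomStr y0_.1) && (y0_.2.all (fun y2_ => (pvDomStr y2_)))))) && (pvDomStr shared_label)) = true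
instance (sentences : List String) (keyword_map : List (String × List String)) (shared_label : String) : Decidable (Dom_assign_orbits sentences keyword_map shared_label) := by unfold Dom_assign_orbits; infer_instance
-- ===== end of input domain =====

-- B replaces A's sentence/orbit/any() triple loop with buckets appended into a defaultdict by a
-- keyword-major scan of flattened (lowered keyword, orbit) pairs plus a group-by over recorded
-- target lists (alternative decomposition; same asymptotic cost).

-- ===== PORT A =====
def assign_orbits (sentences : List String) (keyword_map : List (String × List String)) (shared_label : String) : List (String × List String) :=
  let compiled : PySem.Dict String (List String) :=
    keyword_map.foldl (fun d p => d.insert p.1 (p.2.map PySem.Str.lower)) PySem.Dict.empty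
  (sentences.foldl (fun (buckets : PySem.Dict String (List String)) sentence =>
      let lower := PySem.Str.lower sentence
      let matched := (compiled.items.filter (fun p => p.2.any (fun kw => PySem.Str.isIn kw lower))).map (·.1)
      let target_orbits := if matched.isEmpty then [shared_label] else matched
      target_orbits.foldl (fun b orbit => b.modify orbit [] (· ++ [sentence])) buckets)
    PySem.Dict.empty).items

-- ===== PORT B =====
def assign_orbits_alt (sentences : List String) (keyword_map : List (String × List String)) (shared_label : String) : List (String × List String) :=
  let pairs := keyword_map.flatMap (fun p => p.2.map (fun kw => (PySem.Str.lower kw, p.1)))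
  let targets := sentences.map (fun sentence =>
    let low := PySem.Str.lower sentence
    let ms := (pairs.foldl (fun (st : List String × PySem.Set String) q =>
        if q.2 ∈ st.2 then st
        else if PySem.Str.isIn q.1 low then (st.1 ++ [q.2], PySem.Set.add st.2 q.2) else st)
      ([], PySem.Set.empty)).1
    let tgt := if ms.isEmpty then [shared_label] else ms
    (sentence, tgt, PySem.Set.ofList tgt))
  let order := PySem.List.dedup (targets.flatMap (·.2.1))
  order.map (fun o => (o, (targets.filter (fun t => o ∈ t.2.2)).map (·.1)))

-- ===== PRECONDITION & SPEC =====
-- Pre_ excludes association lists with duplicate orbit keys: A's keyword_map is a Python dict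
-- (a Mapping), so such inputs cannot arise on the Python side at all.
def Pre_assign_orbits (sentences : List String) (keyword_map : List (String × List String)) (shared_label : String) : Prop :=
  (keyword_map.map (·.1)).Nodup
instance (sentences : List String) (keyword_map : List (String × List String)) (shared_label : String) : Decidable (Pre_assign_orbits sentences keyword_map shared_label) := by unfold Pre_assign_orbits; infer_instance
def pvWitness_assign_orbits : List String × (List (String × List String)) × String :=
  (["We watch the Moon.", "Taxes rose."], [("space", ["moon", "mars"]), ("money", ["tax"])], "misc")

def Spec_assign_orbits (sentences : List String) (keyword_map : List (String × List String)) (shared_label : String) (out : List (String × List String)) : Prop := out = assign_orbits_alt sentences keyword_map shared_label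
instance (sentences : List String) (keyword_map : List (String × List String)) (shared_label : String) (out : List (String × List String)) : Decidable (Spec_assign_orbits sentences keyword_map shared_label out) := by unfold Spec_assign_orbits; infer_instance

-- ===== CLAIM (what is proved, stated in full; the proofs are below) =====
def Claim_equal_assign_orbits : Prop := ∀ (sentences : List String) (keyword_map : List (String × List String)) (shared_label : String), Dom_assign_orbits sentences keyword_map shared_label → Pre_assign_orbits sentences keyword_map shared_label → Spec_assign_orbits sentences keyword_map shared_label (assign_orbits sentences keyword_map shared_label)

-- ===== LEMMAS AND PROOFS =====

-- A Nodup list filtered by equality with o is [o] or [].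
theorem filter_beq_of_nodup (l : List String) (o : String) (h : l.Nodup) :
    l.filter (fun x => x == o) = if o ∈ l then [o] else [] := by
  induction l with
  | nil => simp
  | cons x t ih =>
    simp only [List.nodup_cons] at h
    rw [List.filter_cons]
    by_cases hx : x = o
    · subst hx
      have ht : t.filter (fun y => y == x) = [] :=
        List.filter_eq_nil_iff.mpr (fun a ha hb => h.1 ((beq_iff_eq.mp hb) ▸ ha))
      simp [ht]
    · have hne : (x == o) = false := beq_eq_false_iff_ne.mpr hx
      rw [hne]
      simp only [Bool.false_eq_true, if_false, ih h.2, List.mem_cons]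
      have hox : ¬(o = x) := fun hh => hx hh.symm
      simp [hox]

-- getD of the bucket fold: the sentences whose target list contains o, in order.
theorem bucketsGetD (ts : List (String × List String)) (o : String)
    (hnd : ∀ p ∈ ts, p.2.Nodup) :
    ∀ d : PySem.Dict String (List String),
      (ts.foldl (fun b p => p.2.foldl (fun b orbit => b.modify orbit [] (· ++ [p.1])) b) d).getD o []
        = d.getD o [] ++ ((ts.filter (fun t => o ∈ t.2)).map (·.1)) := by
  induction ts with
  | nil => intro d; simp
  | cons p ts ih =>
    intro d
    have hstep : (p.2.foldl (fun b orbit => b.modify orbit [] (· ++ [p.1])) d).getD o []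
        = d.getD o [] ++ (if o ∈ p.2 then [p.1] else []) := by
      have h1 : p.2.foldl (fun b orbit => b.modify orbit [] (· ++ [p.1])) d
          = (p.2.map (fun orbit => (orbit, p.1))).foldl (fun b q => b.modify q.1 [] (· ++ [q.2])) d := by
        rw [List.foldl_map]
      rw [h1, PySem.Dict.getD_foldl_modify_append]
      congr 1
      rw [List.filter_map]
      simp only [Function.comp_def]
      rw [filter_beq_of_nodup p.2 o (hnd p (by simp))]
      split_ifs <;> simp
    simp only [List.foldl_cons, List.filter_cons]
    rw [ih (fun q hq => hnd q (by simp [hq]))]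
    rw [hstep]
    by_cases hm : o ∈ p.2 <;> simp [hm]
  
-- keys of the bucket fold: first-occurrence order of all target orbits.
theorem bucketsKeys (ts : List (String × List String)) :
    ∀ d : PySem.Dict String (List String),
      (ts.foldl (fun b p => p.2.foldl (fun b orbit => b.modify orbit [] (· ++ [p.1])) b) d).keys
        = PySem.Set.update d.keys (ts.flatMap (·.2)) := by
  induction ts with
  | nil => intro d; simp [PySem.Set.update_nil]
  | cons p ts ih =>
    intro d
    simp only [List.foldl_cons, List.flatMap_cons]
    rw [ih, PySem.Set.update_append]
    congr 1
    have h1 : p.2.foldl (fun b orbit => b.modify orbit [] (· ++ [p.1])) d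
        = (p.2.map (fun orbit => (orbit, p.1))).foldl (fun b q => b.modify q.1 [] (· ++ [q.2])) d := by
      rw [List.foldl_map]
    rw [h1, PySem.Dict.keys_foldl_modify_key]
    simp [Function.comp_def]

-- The bucket fold's items equal the group-by expression.
theorem bucketsEq (ts : List (String × List String))
    (hnd : ∀ p ∈ ts, p.2.Nodup) :
    (ts.foldl (fun b p => p.2.foldl (fun b orbit => b.modify orbit [] (· ++ [p.1])) b) PySem.Dict.empty).items
      = (PySem.List.dedup (ts.flatMap (·.2))).map (fun o => (o, (ts.filter (fun t => o ∈ t.2)).map (·.1))) := by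
  set D := ts.foldl (fun b p => p.2.foldl (fun b orbit => b.modify orbit [] (· ++ [p.1])) b) PySem.Dict.empty with hD
  have hkeys : D.keys = PySem.Set.ofList (ts.flatMap (·.2)) := by
    rw [hD, bucketsKeys]
    simp [PySem.Dict.keys_empty, PySem.Set.update_nil_left]
  have hnodup : D.keys.Nodup := by rw [hkeys]; exact PySem.Set.nodup_ofList _
  rw [PySem.Dict.items_eq_map_keys D hnodup []]
  rw [hkeys, PySem.List.dedup_eq_ofList]
  apply List.map_congr_left
  intro o _
  congr 1
  rw [hD, bucketsGetD ts o hnd]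
  simp [PySem.Dict.getD_empty]

-- Inner group scan, orbit already matched: no change.
theorem groupScanMem (low : String) (o : String) (kws : List String)
    (acc : List String) (h : o ∈ acc) :
    (kws.map (fun kw => (kw, o))).foldl (fun ms q =>
        if q.2 ∈ ms then ms else if PySem.Str.isIn q.1 low then ms ++ [q.2] else ms) acc = acc := by
  induction kws with
  | nil => rfl
  | cons kw kws ih => simp only [List.map_cons, List.foldl_cons, h, if_pos]; exact ih

-- Inner group scan, fresh orbit: appended iff some keyword matches.
theorem groupScan (low : String) (o : String) (kws : List String)
    (acc : List String) (h : o ∉ acc) :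
    (kws.map (fun kw => (kw, o))).foldl (fun ms q =>
        if q.2 ∈ ms then ms else if PySem.Str.isIn q.1 low then ms ++ [q.2] else ms) acc
      = acc ++ (if kws.any (fun kw => PySem.Str.isIn kw low) then [o] else []) := by
  induction kws with
  | nil => simp
  | cons kw kws ih =>
    simp only [List.map_cons, List.foldl_cons]
    rw [if_neg h]
    by_cases hkw : PySem.Str.isIn kw low
    · rw [if_pos hkw, groupScanMem low o kws (acc ++ [o]) (by simp)]
      simp only [List.any_cons, hkw, Bool.true_or, if_true]
    · rw [if_neg hkw, ih]
      rw [Bool.not_eq_true] at hkw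
      simp only [List.any_cons, hkw, Bool.false_or]

-- The (ms, seen) pair scan: seen mirrors ms exactly, so it is the plain list scan twice.
theorem pairFoldAux (low : String) (ps : List (String × String)) :
    ∀ acc : List String,
    ps.foldl (fun (st : List String × PySem.Set String) q =>
        if q.2 ∈ st.2 then st
        else if PySem.Str.isIn q.1 low then (st.1 ++ [q.2], PySem.Set.add st.2 q.2) else st)
      (acc, acc)
    = (ps.foldl (fun ms q =>
          if q.2 ∈ ms then ms else if PySem.Str.isIn q.1 low then ms ++ [q.2] else ms) acc,
       ps.foldl (fun ms q =>
          if q.2 ∈ ms then ms else if PySem.Str.isIn q.1 low then ms ++ [q.2] else ms) acc) := by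
  induction ps with
  | nil => intro acc; rfl
  | cons q ps ih =>
    intro acc
    simp only [List.foldl_cons]
    by_cases hm : q.2 ∈ acc
    · rw [if_pos hm, if_pos hm, ih]
    · rw [if_neg hm, if_neg hm]
      by_cases hk : PySem.Str.isIn q.1 low
      · rw [if_pos hk, if_pos hk, PySem.Set.add_of_not_mem hm, ih]
      · rw [if_neg hk, if_neg hk, ih]

theorem pairFold0 (low : String) (ps : List (String × String)) :
    ps.foldl (fun (st : List String × PySem.Set String) q =>
        if q.2 ∈ st.2 then st
        else if PySem.Str.isIn q.1 low then (st.1 ++ [q.2], PySem.Set.add st.2 q.2) else st)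
      ([], PySem.Set.empty)
    = (ps.foldl (fun ms q =>
          if q.2 ∈ ms then ms else if PySem.Str.isIn q.1 low then ms ++ [q.2] else ms) [],
       ps.foldl (fun ms q =>
          if q.2 ∈ ms then ms else if PySem.Str.isIn q.1 low then ms ++ [q.2] else ms) []) :=
  pairFoldAux low ps []

-- Keyword-major scan over flattened pairs = orbit-major filter of the compiled items.
theorem matchedEq (low : String) (L : List (String × List String))
    (hnd : (L.map (·.1)).Nodup) :
    ∀ acc : List String, (∀ p ∈ L, p.1 ∉ acc) →
    (L.flatMap (fun p => p.2.map (fun kw => (kw, p.1)))).foldl (fun ms q =>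
        if q.2 ∈ ms then ms else if PySem.Str.isIn q.1 low then ms ++ [q.2] else ms) acc
      = acc ++ ((L.filter (fun p => p.2.any (fun kw => PySem.Str.isIn kw low))).map (·.1)) := by
  induction L with
  | nil => simp
  | cons p L ih =>
    intro acc hacc
    simp only [List.flatMap_cons, List.foldl_append, List.filter_cons]
    rw [groupScan low p.1 p.2 acc (hacc p (by simp))]
    simp only [List.map_cons, List.nodup_cons] at hnd
    by_cases hm : p.2.any (fun kw => PySem.Str.isIn kw low)
    · simp only [hm, if_pos]
      rw [ih hnd.2 (acc ++ [p.1]) (fun q hq => by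
        simp only [List.mem_append, List.mem_singleton]
        rintro (h | h)
        · exact hacc q (by simp [hq]) h
        · exact hnd.1 (h ▸ List.mem_map_of_mem hq))]
      simp
    · simp only [hm, if_neg, Bool.not_eq_true, List.append_nil]
      rw [ih hnd.2 acc (fun q hq => hacc q (by simp [hq]))]

-- Under Pre_, A's compiled dict is a literal map of the keyword list.
theorem compiledItems (keyword_map : List (String × List String))
    (hnd : (keyword_map.map (·.1)).Nodup) :
    (keyword_map.foldl (fun d p => d.insert p.1 (p.2.map PySem.Str.lower)) PySem.Dict.empty).items
      = keyword_map.map (fun p => (p.1, p.2.map PySem.Str.lower)) := by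
  have h := PySem.Dict.items_foldl_insert_fresh keyword_map
      (fun p : String × List String => p.1) (fun p => p.2.map PySem.Str.lower) PySem.Dict.empty
      (fun a _ => PySem.Dict.contains_empty _) hnd
  simpa using h

-- The whole pipeline for an arbitrary per-sentence target function.
theorem foldMapEq (sentences : List String) (tgt : String → List String)
    (hnd : ∀ s, (tgt s).Nodup) :
    (sentences.foldl (fun (buckets : PySem.Dict String (List String)) s =>
        (tgt s).foldl (fun b orbit => b.modify orbit [] (· ++ [s])) buckets) PySem.Dict.empty).items
    = (PySem.List.dedup ((sentences.map (fun s => (s, tgt s, PySem.Set.ofList (tgt s)))).flatMap (·.2.1))).map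
        (fun o => (o, ((sentences.map (fun s => (s, tgt s, PySem.Set.ofList (tgt s)))).filter
            (fun t => o ∈ t.2.2)).map (·.1))) := by
  have h := bucketsEq (sentences.map (fun s => (s, tgt s))) (by
    intro p hp
    obtain ⟨s, _, rfl⟩ := List.mem_map.mp hp
    exact hnd s)
  rw [List.foldl_map] at h
  refine h.trans ?_
  have e1 : (sentences.map (fun s => (s, tgt s))).flatMap (·.2)
      = (sentences.map (fun s => (s, tgt s, PySem.Set.ofList (tgt s)))).flatMap (·.2.1) := by
    rw [List.flatMap_map, List.flatMap_map]
  rw [e1]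
  refine List.map_congr_left ?_
  intro o _
  refine congrArg _ ?_
  rw [List.filter_map, List.filter_map, List.map_map, List.map_map]
  refine congrArg _ (List.filter_congr ?_)
  intro s _
  simp [PySem.Set.mem_ofList]

-- ===== VERDICT (by name: the statement is the Claim_ definition above) =====
theorem assign_orbits_spec : Claim_equal_assign_orbits := by
  intro sentences keyword_map shared_label _ hpre
  unfold Spec_assign_orbits assign_orbits assign_orbits_alt
  simp only
  have hmnd : ∀ s : String,
      ((((keyword_map.foldl (fun d p => d.insert p.1 (p.2.map PySem.Str.lower)) PySem.Dict.empty).items.filter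
          (fun p => p.2.any (fun kw => PySem.Str.isIn kw (PySem.Str.lower s)))).map (·.1))).Nodup := by
    intro s
    rw [compiledItems keyword_map hpre]
    refine (List.Sublist.map (fun x : String × List String => x.1) List.filter_sublist).nodup ?_
    simpa [List.map_map, Function.comp_def] using hpre
  have hM : ∀ s : String,
      ((keyword_map.flatMap (fun p => p.2.map (fun kw => (PySem.Str.lower kw, p.1)))).foldl
          (fun (st : List String × PySem.Set String) q =>
            if q.2 ∈ st.2 then st
            else if PySem.Str.isIn q.1 (PySem.Str.lower s) then (st.1 ++ [q.2], PySem.Set.add st.2 q.2) else st)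
          ([], PySem.Set.empty)).1
      = (((keyword_map.foldl (fun d p => d.insert p.1 (p.2.map PySem.Str.lower)) PySem.Dict.empty).items.filter
          (fun p => p.2.any (fun kw => PySem.Str.isIn kw (PySem.Str.lower s)))).map (·.1)) := by
    intro s
    rw [pairFold0, compiledItems keyword_map hpre]
    have hflat : keyword_map.flatMap (fun p => p.2.map (fun kw => (PySem.Str.lower kw, p.1)))
        = (keyword_map.map (fun p => (p.1, p.2.map PySem.Str.lower))).flatMap
            (fun p => p.2.map (fun kw => (kw, p.1))) := by
      rw [List.flatMap_map]; simp only [List.map_map, Function.comp_def]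
    rw [hflat, matchedEq (PySem.Str.lower s) (keyword_map.map (fun p => (p.1, p.2.map PySem.Str.lower)))
      (by simpa [List.map_map, Function.comp_def] using hpre) [] (by simp)]
    simp
  simp only [hM]
  exact foldMapEq sentences
    (fun s => if ((((keyword_map.foldl (fun d p => d.insert p.1 (p.2.map PySem.Str.lower)) PySem.Dict.empty).items.filter
          (fun p => p.2.any (fun kw => PySem.Str.isIn kw (PySem.Str.lower s)))).map (·.1))).isEmpty
        then [shared_label]
        else (((keyword_map.foldl (fun d p => d.insert p.1 (p.2.map PySem.Str.lower)) PySem.Dict.empty).items.filter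
          (fun p => p.2.any (fun kw => PySem.Str.isIn kw (PySem.Str.lower s)))).map (·.1)))
    (by intro s; dsimp only; split_ifs with h
        · exact List.nodup_singleton _
        · exact hmnd s)
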